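-- pv_equiv track=rewrite | github.com/Howard-66/QlibResearch | src/qlib_research/core/notebook_workflow.py | _estimate_prune_fit_units
-- ===== SOURCE A (Python) =====
-- def _estimate_prune_fit_units(
--     item_count: int,
--     eval_date_count: int,
--     max_rounds: int | None,
--     candidate_limit: int | None,
-- ) -> int:
--     if item_count <= 1:
--         return 0
--     remaining = item_count
--     total_candidates = 0
--     round_index = 0
--     while remaining > 1:
--         round_index += 1
--         if max_rounds is not None and round_index > max_rounds:
--             break
--         candidate_total = remaining if candidate_limit is None else min(remaining, candidate_limit)
--         total_candidates += candidate_total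
--         remaining -= 1
--     return total_candidates * eval_date_count
-- ===== SOURCE B (Python) =====
-- def _estimate_prune_fit_units(
--     item_count: int,
--     eval_date_count: int,
--     max_rounds: int | None,
--     candidate_limit: int | None,
-- ) -> int:
--     n = item_count
--     if n <= 1:
--         return 0
--     # number of pruning rounds actually executed
--     r = n - 1 if max_rounds is None else max(0, min(n - 1, max_rounds))
--     if candidate_limit is None:
--         total = r * n - r * (r - 1) // 2
--     else:
--         L = candidate_limit
--         f = max(0, min(r, n - L + 1))   # rounds where the limit caps the count (flat part)
--         d = r - f                       # remaining rounds: declining series n, n-1, ...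
--         total = f * L + d * n - (f + r - 1) * d // 2
--     return total * eval_date_count
-- ===== Notes on version B (the rewrite author's own statement) =====
-- stated objective: faster
-- what changed: Replaces A's per-round while loop with a closed-form arithmetic-series formula: the executed round count r is computed directly, and the candidate sum is split into a flat part (rounds capped by candidate_limit) and a declining series, each summed in O(1).
import Mathlib
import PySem

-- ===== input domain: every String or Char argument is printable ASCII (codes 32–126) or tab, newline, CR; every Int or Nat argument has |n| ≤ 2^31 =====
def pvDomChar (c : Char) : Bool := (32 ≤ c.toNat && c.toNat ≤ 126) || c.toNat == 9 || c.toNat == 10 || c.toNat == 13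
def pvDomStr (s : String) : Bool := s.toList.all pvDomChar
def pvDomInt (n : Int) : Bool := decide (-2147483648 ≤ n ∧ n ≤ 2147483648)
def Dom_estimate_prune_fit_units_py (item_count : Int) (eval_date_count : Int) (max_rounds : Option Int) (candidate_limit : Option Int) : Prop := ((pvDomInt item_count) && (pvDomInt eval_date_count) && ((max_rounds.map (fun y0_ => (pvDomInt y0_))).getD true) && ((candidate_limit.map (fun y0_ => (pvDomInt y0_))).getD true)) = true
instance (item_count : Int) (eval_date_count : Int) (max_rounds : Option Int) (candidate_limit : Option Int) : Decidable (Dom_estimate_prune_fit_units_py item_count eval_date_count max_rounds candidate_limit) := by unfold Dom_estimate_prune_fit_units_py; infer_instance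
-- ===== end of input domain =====

-- ===== PORT A =====
-- B replaces A's per-round loop by a closed-form arithmetic-series formula (O(1) vs O(min(item_count, max_rounds))).
-- loop of A: while remaining > 1: round_index += 1; break if past max_rounds; add candidate_total; remaining -= 1
def pruneLoopA (max_rounds : Option Int) (candidate_limit : Option Int)
    (remaining : Int) (total_candidates : Int) (round_index : Int) : Int :=
  if remaining > 1 then
    let round_index' := round_index + 1
    if (match max_rounds with | some m => decide (round_index' > m) | none => false) then
      total_candidates
    else
      pruneLoopA max_rounds candidate_limit (remaining - 1)
        (total_candidates + (match candidate_limit with | none => remaining | some L => min remaining L))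
        round_index'
  else total_candidates
termination_by remaining.toNat
decreasing_by omega

def estimate_prune_fit_units_py (item_count : Int) (eval_date_count : Int) (max_rounds : Option Int) (candidate_limit : Option Int) : Int :=
  if item_count ≤ 1 then 0
  else (pruneLoopA max_rounds candidate_limit item_count 0 0) * eval_date_count

-- ===== PORT B =====
def estimate_prune_fit_units_py_alt (item_count : Int) (eval_date_count : Int) (max_rounds : Option Int) (candidate_limit : Option Int) : Int :=
  let n := item_count
  if n ≤ 1 then 0
  else
    let r := match max_rounds with | none => n - 1 | some m => max 0 (min (n - 1) m)
    let total := match candidate_limit with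
      | none => r * n - PySem.Int.floordiv (r * (r - 1)) 2
      | some L =>
        let f := max 0 (min r (n - L + 1))
        let d := r - f
        f * L + d * n - PySem.Int.floordiv ((f + r - 1) * d) 2
    total * eval_date_count

-- ===== PRECONDITION & SPEC =====
def Spec_estimate_prune_fit_units_py (item_count : Int) (eval_date_count : Int) (max_rounds : Option Int) (candidate_limit : Option Int) (out : Int) : Prop := out = estimate_prune_fit_units_py_alt item_count eval_date_count max_rounds candidate_limit
instance (item_count : Int) (eval_date_count : Int) (max_rounds : Option Int) (candidate_limit : Option Int) (out : Int) : Decidable (Spec_estimate_prune_fit_units_py item_count eval_date_count max_rounds candidate_limit out) := by unfold Spec_estimate_prune_fit_units_py; infer_instance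

-- ===== CLAIM (what is proved, stated in full; the proofs are below) =====
def Claim_equal_estimate_prune_fit_units_py : Prop := ∀ (item_count : Int) (eval_date_count : Int) (max_rounds : Option Int) (candidate_limit : Option Int), Dom_estimate_prune_fit_units_py item_count eval_date_count max_rounds candidate_limit → Spec_estimate_prune_fit_units_py item_count eval_date_count max_rounds candidate_limit (estimate_prune_fit_units_py item_count eval_date_count max_rounds candidate_limit)

-- ===== LEMMAS AND PROOFS =====

-- closed form for the sum of the first r candidate totals starting at remaining = n
def sumTop (n r : Int) (cl : Option Int) : Int :=
  match cl with
  | none => r * n - PySem.Int.floordiv (r * (r - 1)) 2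
  | some L =>
    let f := max 0 (min r (n - L + 1))
    let d := r - f
    f * L + d * n - PySem.Int.floordiv ((f + r - 1) * d) 2

-- rounds the loop still performs from state (remaining = n, round_index = ri)
def roundsLeft (n : Int) (mr : Option Int) (ri : Int) : Int :=
  match mr with
  | none => max (n - 1) 0
  | some m => max 0 (min (n - 1) (m - ri))

theorem fd2_exact (x : Int) (h : 2 ∣ x) : 2 * PySem.Int.floordiv x 2 = x := by
  rw [PySem.Int.floordiv_eq_ediv_of_pos (by norm_num)]
  omega

theorem even_mul_pred (s : Int) : 2 ∣ s * (s - 1) := by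
  rcases Int.even_or_odd s with ⟨k, hk⟩ | ⟨k, hk⟩
  · exact ⟨k * (s - 1), by linear_combination (s - 1) * hk⟩
  · exact ⟨s * k, by linear_combination s * hk⟩

theorem even_flat (a b : Int) : 2 ∣ (a + b - 1) * (b - a) := by
  rcases Int.even_or_odd (b - a) with ⟨k, hk⟩ | ⟨k, hk⟩
  · exact ⟨(a + b - 1) * k, by linear_combination (a + b - 1) * hk⟩
  · exact ⟨(a + k) * (b - a), by linear_combination (b - a) * hk⟩

theorem sumTop_zero (n : Int) (cl : Option Int) : sumTop n 0 cl = 0 := by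
  cases cl with
  | none => simp [sumTop, PySem.Int.floordiv]
  | some L =>
    simp only [sumTop]
    have hf : max 0 (min 0 (n - L + 1)) = 0 := by omega
    rw [hf]
    simp [PySem.Int.floordiv]

theorem sumTop_succ (n r : Int) (cl : Option Int) (hr : 1 ≤ r) :
    sumTop n r cl
      = (match cl with | none => n | some L => min n L) + sumTop (n - 1) (r - 1) cl := by
  cases cl with
  | none =>
    simp only [sumTop]
    have h1 := fd2_exact (r * (r - 1)) (even_mul_pred r)
    have h2 := fd2_exact ((r - 1) * (r - 1 - 1)) (even_mul_pred (r - 1))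
    set t1 := PySem.Int.floordiv (r * (r - 1)) 2 with ht1
    set t2 := PySem.Int.floordiv ((r - 1) * (r - 1 - 1)) 2 with ht2
    have key : 2 * (r * n - t1) = 2 * (n + ((r - 1) * (n - 1) - t2)) := by
      linear_combination h2 - h1
    linarith
  | some L =>
    simp only [sumTop]
    by_cases hf : min r (n - L + 1) ≤ 0
    · -- limit never binds (n < L): pure declining sum, and min n L = n
      have hmin : min n L = n := by omega
      have hf0 : max 0 (min r (n - L + 1)) = 0 := by omega
      have hf0' : max 0 (min (r - 1) (n - 1 - L + 1)) = 0 := by omega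
      rw [hf0, hf0', hmin]
      have h1 := fd2_exact ((0 + r - 1) * (r - 0)) (even_flat 0 r)
      have h2 := fd2_exact ((0 + (r - 1) - 1) * (r - 1 - 0)) (even_flat 0 (r - 1))
      set t1 := PySem.Int.floordiv ((0 + r - 1) * (r - 0)) 2
      set t2 := PySem.Int.floordiv ((0 + (r - 1) - 1) * (r - 1 - 0)) 2
      have key : 2 * ((0:Int) * L + (r - 0) * n - t1)
           = 2 * (n + ((0:Int) * L + (r - 1 - 0) * (n - 1) - t2)) := by
        linear_combination h2 - h1
      linarith
    · -- limit binds in the first round: min n L = L, flat count drops by one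
      have hfpos : 0 < min r (n - L + 1) := by omega
      have hmin : min n L = L := by omega
      set f := max 0 (min r (n - L + 1)) with hfdef
      have hf1 : 1 ≤ f := by omega
      have hf' : max 0 (min (r - 1) (n - 1 - L + 1)) = f - 1 := by omega
      rw [hf', hmin]
      have h1 := fd2_exact ((f + r - 1) * (r - f)) (even_flat f r)
      have h2 := fd2_exact ((f - 1 + (r - 1) - 1) * (r - 1 - (f - 1))) (even_flat (f - 1) (r - 1))
      set t1 := PySem.Int.floordiv ((f + r - 1) * (r - f)) 2
      set t2 := PySem.Int.floordiv ((f - 1 + (r - 1) - 1) * (r - 1 - (f - 1))) 2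
      have key : 2 * (f * L + (r - f) * n - t1)
           = 2 * (L + ((f - 1) * L + (r - 1 - (f - 1)) * (n - 1) - t2)) := by
        linear_combination h2 - h1
      linarith

theorem roundsLeft_zero_of_le (n : Int) (mr : Option Int) (ri : Int) (hn : n ≤ 1) :
    roundsLeft n mr ri = 0 := by
  cases mr <;> simp [roundsLeft] <;> omega

theorem pruneLoopA_eq (mr cl : Option Int) :
    ∀ (k : Nat) (n total ri : Int), n.toNat ≤ k →
      pruneLoopA mr cl n total ri = total + sumTop n (roundsLeft n mr ri) cl := by
  intro k
  induction k with
  | zero =>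
    intro n total ri hk
    rw [pruneLoopA.eq_def]
    have hn : ¬ n > 1 := by omega
    simp only [hn, if_false]
    rw [roundsLeft_zero_of_le n mr ri (by omega), sumTop_zero]
    ring
  | succ k ih =>
    intro n total ri hk
    rw [pruneLoopA.eq_def]
    by_cases hn : n > 1
    · simp only [hn, if_true]
      cases mr with
      | none =>
        rw [if_neg (by simp)]
        rw [ih (n - 1) _ (ri + 1) (by omega)]
        have hr1 : roundsLeft (n - 1) none (ri + 1) = roundsLeft n none ri - 1 := by
          simp only [roundsLeft]; omega
        rw [hr1, sumTop_succ n (roundsLeft n none ri) cl (by simp only [roundsLeft]; omega)]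
        cases cl <;> dsimp only <;> ring
      | some m =>
        by_cases hm : ri + 1 > m
        · simp only [hm, decide_true]
          rw [if_pos trivial]
          have h0 : roundsLeft n (some m) ri = 0 := by simp only [roundsLeft]; omega
          rw [h0, sumTop_zero]; ring
        · simp only [hm, decide_false]
          rw [if_neg (by simp)]
          rw [ih (n - 1) _ (ri + 1) (by omega)]
          have hr1 : roundsLeft (n - 1) (some m) (ri + 1) = roundsLeft n (some m) ri - 1 := by
            simp only [roundsLeft]; omega
          rw [hr1, sumTop_succ n (roundsLeft n (some m) ri) cl (by simp only [roundsLeft]; omega)]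
          cases cl <;> dsimp only <;> ring
    · simp only [hn, if_false]
      rw [roundsLeft_zero_of_le n mr ri (by omega), sumTop_zero]
      ring

-- ===== VERDICT (by name: the statement is the Claim_ definition above) =====
theorem estimate_prune_fit_units_py_spec : Claim_equal_estimate_prune_fit_units_py := by
  intro n ed mr cl hD
  clear hD
  unfold Spec_estimate_prune_fit_units_py estimate_prune_fit_units_py estimate_prune_fit_units_py_alt
  by_cases hn : n ≤ 1
  · simp [hn]
  · simp only [hn, if_false]
    rw [pruneLoopA_eq mr cl n.toNat n 0 0 le_rfl, zero_add]
    have hr : roundsLeft n mr 0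
        = (match mr with | none => n - 1 | some m => max 0 (min (n - 1) m)) := by
      cases mr <;> simp only [roundsLeft] <;> omega
    rw [hr]
    cases mr <;> cases cl <;> rfl
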